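-- pv_equiv track=rewrite | github.com/khakhalin/MTG | archive/Henry/karsten_metric.py | get_colored_symbols
-- ===== SOURCE A (Python) =====
-- def get_colored_symbols(pool):
--     colors = {'W':0, 'U':0, 'B':0, 'R':0, 'G':0}
--     for i in range(len(pool)):
--
--         # Gets card and mana cost, skipping it if it doesn't have one
--         card = pool[i]
--         if 'manaCost' not in card:
--             continue
--         else:
--             mana_cost = card['manaCost']
--
--         # Treats hybrid-cost cards as different cards
--         if 'W' in mana_cost:
--             colors['W'] += mana_cost.count('W')
--         if 'U' in mana_cost:
--             colors['U'] += mana_cost.count('U')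
--         if 'B' in mana_cost:
--             colors['B'] += mana_cost.count('B')
--         if 'R' in mana_cost:
--             colors['R'] += mana_cost.count('R')
--         if 'G' in mana_cost:
--             colors['G'] += mana_cost.count('G')
--     return colors
-- ===== SOURCE B (Python) =====
-- def get_colored_symbols(pool):
--     colors = {'W': 0, 'U': 0, 'B': 0, 'R': 0, 'G': 0}
--     for card in pool:
--         for ch in card.get('manaCost', ''):
--             if ch in colors:
--                 colors[ch] += 1
--     return colors
-- ===== Notes on version B (the rewrite author's own statement) =====
-- stated objective: simpler
-- what changed: Replaces the five guarded substring .count scans per card with a single character pass that increments the matching color counter, and uses dict.get with a default instead of the membership-test/continue dance.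
import Mathlib
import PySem

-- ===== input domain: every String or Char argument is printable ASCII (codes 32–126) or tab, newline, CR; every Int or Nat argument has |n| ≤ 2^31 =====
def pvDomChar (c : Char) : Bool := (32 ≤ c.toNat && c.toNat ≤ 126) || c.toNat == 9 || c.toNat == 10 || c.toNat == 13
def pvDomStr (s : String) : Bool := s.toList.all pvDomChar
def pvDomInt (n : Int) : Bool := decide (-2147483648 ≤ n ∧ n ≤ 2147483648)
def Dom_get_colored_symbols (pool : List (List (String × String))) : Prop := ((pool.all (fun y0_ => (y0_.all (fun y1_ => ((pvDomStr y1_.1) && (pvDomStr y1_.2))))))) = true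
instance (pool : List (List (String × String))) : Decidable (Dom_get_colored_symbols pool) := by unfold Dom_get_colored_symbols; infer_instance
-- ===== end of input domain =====

-- B replaces A's five guarded substring-count scans per card by one character pass that
-- increments the matching color counter (objective: simpler); return value only, no mutation.

-- ===== PORT A =====
def pvInitA : PySem.Dict String Int :=
  PySem.Dict.ofList [("W", 0), ("U", 0), ("B", 0), ("R", 0), ("G", 0)]

-- body of A's loop over i: card = pool[i]; skip if no 'manaCost'; five guarded count-adds
def pvCardStepA (colors : PySem.Dict String Int) (card : List (String × String)) :
    PySem.Dict String Int :=
  match (PySem.Dict.mk card).get? "manaCost" with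
  | none => colors
  | some mana_cost =>
    let colors := if PySem.Str.isIn "W" mana_cost then
        colors.modify "W" 0 (· + (PySem.Str.count mana_cost "W" : Int)) else colors
    let colors := if PySem.Str.isIn "U" mana_cost then
        colors.modify "U" 0 (· + (PySem.Str.count mana_cost "U" : Int)) else colors
    let colors := if PySem.Str.isIn "B" mana_cost then
        colors.modify "B" 0 (· + (PySem.Str.count mana_cost "B" : Int)) else colors
    let colors := if PySem.Str.isIn "R" mana_cost then
        colors.modify "R" 0 (· + (PySem.Str.count mana_cost "R" : Int)) else colors
    let colors := if PySem.Str.isIn "G" mana_cost then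
        colors.modify "G" 0 (· + (PySem.Str.count mana_cost "G" : Int)) else colors
    colors

def get_colored_symbols (pool : List (List (String × String))) : List (String × Int) :=
  ((PySem.List.pyRange 0 (pool.length : Int) 1).foldl
    (fun colors i => pvCardStepA colors (PySem.List.pyGetD pool i [])) pvInitA).items

-- ===== PORT B =====
-- B starts from the same colors literal pvInitA
-- body of B's inner loop: if ch in colors: colors[ch] += 1
def pvChStepB (colors : PySem.Dict String Int) (ch : Char) : PySem.Dict String Int :=
  if colors.contains (String.ofList [ch]) then colors.modify (String.ofList [ch]) 0 (· + 1) else colors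

-- body of B's outer loop: for ch in card.get('manaCost', '')
def pvCardStepB (colors : PySem.Dict String Int) (card : List (String × String)) :
    PySem.Dict String Int :=
  ((PySem.Dict.mk card).getD "manaCost" "").toList.foldl pvChStepB colors

def get_colored_symbols_alt (pool : List (List (String × String))) : List (String × Int) :=
  (pool.foldl pvCardStepB pvInitA).items

-- ===== PRECONDITION & SPEC =====
def Spec_get_colored_symbols (pool : List (List (String × String))) (out : List (String × Int)) : Prop := out = get_colored_symbols_alt pool
instance (pool : List (List (String × String))) (out : List (String × Int)) : Decidable (Spec_get_colored_symbols pool out) := by unfold Spec_get_colored_symbols; infer_instance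

-- ===== CLAIM (what is proved, stated in full; the proofs are below) =====
def Claim_equal_get_colored_symbols : Prop := ∀ (pool : List (List (String × String))), Dom_get_colored_symbols pool → Spec_get_colored_symbols pool (get_colored_symbols pool)

-- ===== LEMMAS AND PROOFS =====

-- the loop state of both programs: the five-key color dict, in insertion order
def pvCol (w u b r g : Int) : PySem.Dict String Int :=
  PySem.Dict.mk [("W", w), ("U", u), ("B", b), ("R", r), ("G", g)]

-- Python s.count(c) for a single character c is the character count
theorem pv_count_go_single (c : Char) : ∀ (fuel : Nat) (l : List Char) (acc : Nat),
    l.length ≤ fuel → PySem.Chars.count.go [c] fuel l acc = acc + l.count c := by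
  intro fuel
  induction fuel with
  | zero =>
    intro l acc h
    have : l = [] := List.length_eq_zero_iff.mp (Nat.le_zero.mp h)
    subst this
    simp [PySem.Chars.count.go]
  | succ n ih =>
    intro l acc h
    cases l with
    | nil => simp [PySem.Chars.count.go]
    | cons x t =>
      by_cases hx : x = c
      · subst hx
        simp only [PySem.Chars.count.go, List.isPrefixOf, BEq.rfl, Bool.true_and,
          List.isPrefixOf_nil_left, if_pos]
        rw [show List.drop [x].length (x :: t) = t from rfl]
        rw [ih t (acc + 1) (by simpa using h)]
        simp [List.count_cons]
        omega
      · have hpre : [c].isPrefixOf (x :: t) = false := by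
          simp [List.isPrefixOf, hx]
          exact fun hh => absurd hh.symm hx
        simp only [PySem.Chars.count.go, hpre, Bool.false_eq_true, if_false]
        rw [ih t acc (by simpa using h)]
        simp [hx]

theorem pv_count_single (l : List Char) (c : Char) :
    PySem.Chars.count l [c] = l.count c := by
  unfold PySem.Chars.count
  simp [pv_count_go_single c l.length l 0 le_rfl]

-- if c does not occur (A's 'if c in mana_cost' guard is false), the count is 0
theorem pv_not_isIn_count (l : List Char) (c : Char)
    (h : PySem.Chars.isIn [c] l = false) : l.count c = 0 := by
  rw [List.count_eq_zero]
  intro hc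
  obtain ⟨s, t, rfl⟩ := List.append_of_mem hc
  have : [c] <:+: s ++ c :: t := ⟨s, t, by simp⟩
  have := (PySem.Chars.isIn_iff_infix _ _).mpr this
  rw [h] at this
  exact absurd this (by simp)

-- one guarded count-add of A, on the five-key state (one lemma per color)
theorem pv_gW (mc : String) (w u b r g : Int) :
    (if PySem.Str.isIn "W" mc then (pvCol w u b r g).modify "W" 0 (· + (PySem.Str.count mc "W" : Int)) else pvCol w u b r g)
      = pvCol (w + (mc.toList.count 'W' : Int)) u b r g := by
  by_cases h : PySem.Str.isIn "W" mc
  · rw [if_pos h]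
    simp [pvCol, PySem.Dict.modify, PySem.Dict.insert, PySem.Dict.getD, PySem.Dict.get?,
      PySem.Dict.contains, PySem.Str.count_eq, pv_count_single]
  · rw [if_neg h]
    have : mc.toList.count 'W' = 0 := by
      apply pv_not_isIn_count
      simp only [Bool.not_eq_true] at h
      simpa using h
    simp [this]

theorem pv_gU (mc : String) (w u b r g : Int) :
    (if PySem.Str.isIn "U" mc then (pvCol w u b r g).modify "U" 0 (· + (PySem.Str.count mc "U" : Int)) else pvCol w u b r g)
      = pvCol w (u + (mc.toList.count 'U' : Int)) b r g := by
  by_cases h : PySem.Str.isIn "U" mc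
  · rw [if_pos h]
    simp [pvCol, PySem.Dict.modify, PySem.Dict.insert, PySem.Dict.getD, PySem.Dict.get?,
      PySem.Dict.contains, PySem.Str.count_eq, pv_count_single]
  · rw [if_neg h]
    have : mc.toList.count 'U' = 0 := by
      apply pv_not_isIn_count
      simp only [Bool.not_eq_true] at h
      simpa using h
    simp [this]

theorem pv_gB (mc : String) (w u b r g : Int) :
    (if PySem.Str.isIn "B" mc then (pvCol w u b r g).modify "B" 0 (· + (PySem.Str.count mc "B" : Int)) else pvCol w u b r g)
      = pvCol w u (b + (mc.toList.count 'B' : Int)) r g := by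
  by_cases h : PySem.Str.isIn "B" mc
  · rw [if_pos h]
    simp [pvCol, PySem.Dict.modify, PySem.Dict.insert, PySem.Dict.getD, PySem.Dict.get?,
      PySem.Dict.contains, PySem.Str.count_eq, pv_count_single]
  · rw [if_neg h]
    have : mc.toList.count 'B' = 0 := by
      apply pv_not_isIn_count
      simp only [Bool.not_eq_true] at h
      simpa using h
    simp [this]

theorem pv_gR (mc : String) (w u b r g : Int) :
    (if PySem.Str.isIn "R" mc then (pvCol w u b r g).modify "R" 0 (· + (PySem.Str.count mc "R" : Int)) else pvCol w u b r g)
      = pvCol w u b (r + (mc.toList.count 'R' : Int)) g := by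
  by_cases h : PySem.Str.isIn "R" mc
  · rw [if_pos h]
    simp [pvCol, PySem.Dict.modify, PySem.Dict.insert, PySem.Dict.getD, PySem.Dict.get?,
      PySem.Dict.contains, PySem.Str.count_eq, pv_count_single]
  · rw [if_neg h]
    have : mc.toList.count 'R' = 0 := by
      apply pv_not_isIn_count
      simp only [Bool.not_eq_true] at h
      simpa using h
    simp [this]

theorem pv_gG (mc : String) (w u b r g : Int) :
    (if PySem.Str.isIn "G" mc then (pvCol w u b r g).modify "G" 0 (· + (PySem.Str.count mc "G" : Int)) else pvCol w u b r g)
      = pvCol w u b r (g + (mc.toList.count 'G' : Int)) := by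
  by_cases h : PySem.Str.isIn "G" mc
  · rw [if_pos h]
    simp [pvCol, PySem.Dict.modify, PySem.Dict.insert, PySem.Dict.getD, PySem.Dict.get?,
      PySem.Dict.contains, PySem.Str.count_eq, pv_count_single]
  · rw [if_neg h]
    have : mc.toList.count 'G' = 0 := by
      apply pv_not_isIn_count
      simp only [Bool.not_eq_true] at h
      simpa using h
    simp [this]

-- A's per-card step on the five-key state, in terms of character counts
theorem pv_stepA (card : List (String × String)) (w u b r g : Int) :
    pvCardStepA (pvCol w u b r g) card
      = (let mc := ((PySem.Dict.mk card).get? "manaCost").getD ""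
         pvCol (w + (mc.toList.count 'W' : Int)) (u + (mc.toList.count 'U' : Int))
               (b + (mc.toList.count 'B' : Int)) (r + (mc.toList.count 'R' : Int))
               (g + (mc.toList.count 'G' : Int))) := by
  unfold pvCardStepA
  cases hmc : (PySem.Dict.mk card).get? "manaCost" with
  | none => simp
  | some mc =>
    simp only [hmc, Option.getD_some]
    rw [pv_gW, pv_gU, pv_gB, pv_gR, pv_gG]

-- a one-character string differs from the five color keys when its character does
theorem pv_single_beq (c d : Char) (h : ¬ c = d) :
    (String.ofList [d] == String.ofList [c]) = false := by
  rw [beq_eq_false_iff_ne]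
  intro hh
  have : ([d] : List Char) = [c] := by simpa using congrArg String.toList hh
  exact h (by simpa using this.symm)

-- B's inner character loop on the five-key state
theorem pv_innerB (cs : List Char) : ∀ (w u b r g : Int),
    cs.foldl pvChStepB (pvCol w u b r g)
      = pvCol (w + (cs.count 'W' : Int)) (u + (cs.count 'U' : Int)) (b + (cs.count 'B' : Int))
              (r + (cs.count 'R' : Int)) (g + (cs.count 'G' : Int)) := by
  induction cs with
  | nil => intro w u b r g; simp
  | cons c cs ih =>
    intro w u b r g
    have hstep : pvChStepB (pvCol w u b r g) c
        = pvCol (w + if c = 'W' then 1 else 0) (u + if c = 'U' then 1 else 0)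
                (b + if c = 'B' then 1 else 0) (r + if c = 'R' then 1 else 0)
                (g + if c = 'G' then 1 else 0) := by
      have eW : ("W" : String) = String.ofList ['W'] := rfl
      have eU : ("U" : String) = String.ofList ['U'] := rfl
      have eB : ("B" : String) = String.ofList ['B'] := rfl
      have eR : ("R" : String) = String.ofList ['R'] := rfl
      have eG : ("G" : String) = String.ofList ['G'] := rfl
      by_cases hW : c = 'W'
      · subst hW
        simp [pvChStepB, pvCol, PySem.Dict.contains, PySem.Dict.modify, PySem.Dict.insert,
          PySem.Dict.getD, PySem.Dict.get?, ← eW, ← eU, ← eB, ← eR, ← eG]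
      · by_cases hU : c = 'U'
        · subst hU
          simp [pvChStepB, pvCol, PySem.Dict.contains, PySem.Dict.modify, PySem.Dict.insert,
            PySem.Dict.getD, PySem.Dict.get?, ← eW, ← eU, ← eB, ← eR, ← eG, hW]
        · by_cases hB : c = 'B'
          · subst hB
            simp [pvChStepB, pvCol, PySem.Dict.contains, PySem.Dict.modify, PySem.Dict.insert,
              PySem.Dict.getD, PySem.Dict.get?, ← eW, ← eU, ← eB, ← eR, ← eG, hW, hU]
          · by_cases hR : c = 'R'
            · subst hR
              simp [pvChStepB, pvCol, PySem.Dict.contains, PySem.Dict.modify, PySem.Dict.insert,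
                PySem.Dict.getD, PySem.Dict.get?, ← eW, ← eU, ← eB, ← eR, ← eG, hW, hU, hB]
            · by_cases hG : c = 'G'
              · subst hG
                simp [pvChStepB, pvCol, PySem.Dict.contains, PySem.Dict.modify, PySem.Dict.insert,
                  PySem.Dict.getD, PySem.Dict.get?, ← eW, ← eU, ← eB, ← eR, ← eG, hW, hU, hB, hR]
              · have hcontains : (pvCol w u b r g).contains (String.ofList [c]) = false := by
                  simp only [pvCol, PySem.Dict.contains, List.any_cons, List.any_nil,
                    Bool.or_false, eW, eU, eB, eR, eG,
                    pv_single_beq c 'W' hW, pv_single_beq c 'U' hU, pv_single_beq c 'B' hB,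
                    pv_single_beq c 'R' hR, pv_single_beq c 'G' hG]
                simp [pvChStepB, hcontains, hW, hU, hB, hR, hG]
    rw [List.foldl_cons, hstep, ih]
    simp only [pvCol, List.count_cons]
    norm_num [PySem.Dict.mk.injEq]
    constructor
    · split_ifs with h1 h2 <;> simp_all <;> omega
    constructor
    · split_ifs with h1 h2 <;> simp_all <;> omega
    constructor
    · split_ifs with h1 h2 <;> simp_all <;> omega
    constructor
    · split_ifs with h1 h2 <;> simp_all <;> omega
    · split_ifs with h1 h2 <;> simp_all <;> omega

-- B's per-card step equals A's per-card step on the five-key state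
theorem pv_stepB (card : List (String × String)) (w u b r g : Int) :
    pvCardStepB (pvCol w u b r g) card = pvCardStepA (pvCol w u b r g) card := by
  rw [pv_stepA]
  unfold pvCardStepB
  rw [PySem.Dict.getD_eq_get?_getD, pv_innerB]

theorem pv_main_fold (pool : List (List (String × String))) : ∀ (w u b r g : Int),
    pool.foldl pvCardStepA (pvCol w u b r g) = pool.foldl pvCardStepB (pvCol w u b r g) := by
  induction pool with
  | nil => intro w u b r g; rfl
  | cons card pool ih =>
    intro w u b r g
    rw [List.foldl_cons, List.foldl_cons, ← pv_stepB,
      (pv_stepB card w u b r g).trans (pv_stepA card w u b r g)]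
    exact ih _ _ _ _ _

-- ===== VERDICT (by name: the statement is the Claim_ definition above) =====
theorem get_colored_symbols_spec : Claim_equal_get_colored_symbols := by
  intro pool _
  unfold Spec_get_colored_symbols get_colored_symbols get_colored_symbols_alt
  rw [PySem.List.foldl_pyRange_zero_pyGetD' pool ([] : List (String × String)) pvCardStepA pvInitA]
  have hinit : pvInitA = pvCol 0 0 0 0 0 := by decide
  rw [hinit, pv_main_fold]
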